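-- pv_equiv track=rewrite | github.com/Das-R10/AI-CTO | backend/agent_executor.py | _resolve_filename
-- ===== SOURCE A (Python) =====
-- def _resolve_filename(llm_name: str, file_list: list[str]) -> str:
--     if not llm_name or not file_list:
--         return llm_name
--     if llm_name in file_list:
--         return llm_name
--     llm_lower = llm_name.lower()
--     for f in file_list:
--         if f.lower() == llm_lower:
--             return f
--     for f in file_list:
--         if llm_lower in f.lower() or f.lower() in llm_lower:
--             return f
--     return llm_name
-- ===== SOURCE B (Python) =====
-- def _resolve_filename(llm_name: str, file_list: list[str]) -> str:
--     if not llm_name or not file_list: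
--         return llm_name
--     llm_lower = llm_name.lower()
--     exact = False
--     ci_match = None
--     sub_match = None
--     for f in file_list:
--         if f == llm_name:
--             exact = True
--         fl = f.lower()
--         if ci_match is None and fl == llm_lower:
--             ci_match = f
--         if sub_match is None and (llm_lower in fl or fl in llm_lower):
--             sub_match = f
--     if exact:
--         return llm_name
--     if ci_match is not None:
--         return ci_match
--     if sub_match is not None:
--         return sub_match
--     return llm_name
-- ===== Notes on version B (the rewrite author's own statement) =====
-- stated objective: alternative
-- what changed: Replaces A's three sequential scans (membership test, case-insensitive pass, substring pass) by a single pass that maintains an exact flag plus the first case-insensitive and first substring matches, resolved by priority after the loop.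
import Mathlib
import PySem

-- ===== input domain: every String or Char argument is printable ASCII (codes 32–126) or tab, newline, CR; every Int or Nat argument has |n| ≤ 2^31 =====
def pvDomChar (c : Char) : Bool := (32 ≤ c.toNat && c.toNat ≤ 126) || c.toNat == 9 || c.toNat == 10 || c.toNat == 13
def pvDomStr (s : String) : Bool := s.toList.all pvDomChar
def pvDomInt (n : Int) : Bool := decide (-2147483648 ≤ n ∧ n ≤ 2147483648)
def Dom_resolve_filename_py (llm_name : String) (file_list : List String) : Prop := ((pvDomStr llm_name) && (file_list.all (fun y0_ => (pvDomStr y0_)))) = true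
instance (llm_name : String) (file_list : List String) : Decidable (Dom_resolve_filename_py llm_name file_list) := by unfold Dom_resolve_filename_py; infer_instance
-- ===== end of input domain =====

-- B replaces A's three sequential scans by one pass keeping (exact flag, first CI match, first substring match);
-- alternative decomposition, same cost; return values proved identical on all inputs.

-- ===== PORT A =====
-- first pass of A: first f with f.lower() == llm_lower
def aFindCI (llm_lower : String) : List String → Option String
  | [] => none
  | f :: rest => if PySem.Str.lower f == llm_lower then some f else aFindCI llm_lower rest

-- second pass of A: first f with llm_lower in f.lower() or f.lower() in llm_lower
def aFindSub (llm_lower : String) : List String → Option String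
  | [] => none
  | f :: rest =>
      if PySem.Str.isIn llm_lower (PySem.Str.lower f) || PySem.Str.isIn (PySem.Str.lower f) llm_lower
      then some f else aFindSub llm_lower rest

def resolve_filename_py (llm_name : String) (file_list : List String) : String :=
  if llm_name == "" || file_list.isEmpty then llm_name
  else if file_list.contains llm_name then llm_name
  else
    let llm_lower := PySem.Str.lower llm_name
    match aFindCI llm_lower file_list with
    | some f => f
    | none =>
      match aFindSub llm_lower file_list with
      | some f => f
      | none => llm_name

-- ===== PORT B =====
def bCi (f llm_lower : String) : Bool := PySem.Str.lower f == llm_lower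

def bSub (f llm_lower : String) : Bool :=
  PySem.Str.isIn llm_lower (PySem.Str.lower f) || PySem.Str.isIn (PySem.Str.lower f) llm_lower

-- the single loop of B over (exact, ci_match, sub_match)
def bScan (llm_name llm_lower : String) :
    List String → Bool × Option String × Option String → Bool × Option String × Option String
  | [], st => st
  | f :: rest, (e, c, s) =>
      bScan llm_name llm_lower rest
        (e || f == llm_name,
         if c.isNone && bCi f llm_lower then some f else c,
         if s.isNone && bSub f llm_lower then some f else s)

def resolve_filename_py_alt (llm_name : String) (file_list : List String) : String :=
  if llm_name == "" || file_list.isEmpty then llm_name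
  else
    let llm_lower := PySem.Str.lower llm_name
    match bScan llm_name llm_lower file_list (false, none, none) with
    | (e, c, s) =>
      if e then llm_name
      else
        match c with
        | some f => f
        | none =>
          match s with
          | some f => f
          | none => llm_name

-- ===== PRECONDITION & SPEC =====
def Spec_resolve_filename_py (llm_name : String) (file_list : List String) (out : String) : Prop := out = resolve_filename_py_alt llm_name file_list
instance (llm_name : String) (file_list : List String) (out : String) : Decidable (Spec_resolve_filename_py llm_name file_list out) := by unfold Spec_resolve_filename_py; infer_instance

-- ===== CLAIM (what is proved, stated in full; the proofs are below) =====
def Claim_equal_resolve_filename_py : Prop := ∀ (llm_name : String) (file_list : List String), Dom_resolve_filename_py llm_name file_list → Spec_resolve_filename_py llm_name file_list (resolve_filename_py llm_name file_list)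

-- ===== LEMMAS AND PROOFS =====

-- strings' BEq is symmetric (B compares f == llm_name, membership compares llm_name == f)
theorem strBeq_comm (a b : String) : (a == b) = (b == a) := by
  by_cases h : a = b
  · simp [h]
  · simp [beq_eq_false_iff_ne.mpr h, beq_eq_false_iff_ne.mpr (Ne.symm h)]

-- the one-pass state equals (membership, first CI match, first substring match) of the remaining list
theorem bScan_eq (ln ll : String) (l : List String) (e : Bool) (c s : Option String) :
    bScan ln ll l (e, c, s) =
      (e || l.contains ln, c.or (aFindCI ll l), s.or (aFindSub ll l)) := by
  induction l generalizing e c s with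
  | nil => simp [bScan, aFindCI, aFindSub]
  | cons f rest ih =>
    simp only [bScan, ih, List.contains_cons]
    refine Prod.ext ?_ (Prod.ext ?_ ?_)
    · simp [strBeq_comm f ln, Bool.or_assoc]
    · cases c with
      | some v => simp
      | none =>
        simp only [Option.isNone_none, Bool.true_and, aFindCI, bCi]
        split <;> simp
    · cases s with
      | some v => simp
      | none =>
        simp only [Option.isNone_none, Bool.true_and, aFindSub, bSub]
        split <;> simp

-- ===== VERDICT (by name: the statement is the Claim_ definition above) =====
theorem resolve_filename_py_spec : Claim_equal_resolve_filename_py := by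
  intro ln fl _
  unfold Spec_resolve_filename_py resolve_filename_py resolve_filename_py_alt
  split
  · rfl
  · by_cases hm : fl.contains ln = true
    · simp [bScan_eq]
    · rw [Bool.not_eq_true] at hm
      simp only [bScan_eq, Bool.false_or, Option.none_or, hm, Bool.false_eq_true, if_false]
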